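-- pv_equiv track=rewrite | github.com/posl/comment_recommendation | script/mod_gen/2_time/zh/192_C/1.py | check
-- ===== SOURCE A (Python) =====
-- def check(s):
--     for i in range(len(s)):
--         if i%2 == 0:
--             if s[i].islower():
--                 return False
--         else:
--             if s[i].isupper():
--                 return False
--     return True
-- ===== SOURCE B (Python) =====
-- def check(s):
--     return (all(not c.islower() for c in s[::2])
--             and all(not c.isupper() for c in s[1::2]))
-- ===== Notes on version B (the rewrite author's own statement) =====
-- stated objective: simpler
-- what changed: B replaces A's single modulo-branched index loop with early returns by two separate all(...) passes over the two index-parity slices s[::2] and s[1::2].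
import Mathlib
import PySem

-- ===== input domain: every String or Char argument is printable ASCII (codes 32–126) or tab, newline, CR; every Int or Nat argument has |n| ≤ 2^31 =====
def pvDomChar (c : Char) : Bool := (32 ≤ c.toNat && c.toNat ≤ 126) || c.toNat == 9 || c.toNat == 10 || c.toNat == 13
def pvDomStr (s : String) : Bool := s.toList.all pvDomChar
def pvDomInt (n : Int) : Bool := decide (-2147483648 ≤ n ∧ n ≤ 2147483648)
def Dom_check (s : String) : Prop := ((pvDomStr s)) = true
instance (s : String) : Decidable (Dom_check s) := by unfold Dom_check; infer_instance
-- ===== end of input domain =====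

-- B is simpler: it checks the two index-parity slices s[::2] and s[1::2] in two separate passes
-- instead of A's single modulo-branched index loop with early returns.

-- ===== PORT A =====
def checkGo (cs : List Char) (i : Nat) : Bool :=
  if h : i < cs.length then
    if i % 2 == 0 then
      if PySem.Chars.islower cs[i] then false else checkGo cs (i + 1)
    else
      if PySem.Chars.isupper cs[i] then false else checkGo cs (i + 1)
  else true
termination_by cs.length - i

def check (s : String) : Bool := checkGo s.toList 0

-- ===== PORT B =====
def check_alt (s : String) : Bool :=
  ((PySem.List.slice? s.toList none none 2).getD []).all (fun c => !(PySem.Chars.islower c))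
  && ((PySem.List.slice? s.toList (some 1) none 2).getD []).all (fun c => !(PySem.Chars.isupper c))

-- ===== PRECONDITION & SPEC =====
def Spec_check (s : String) (out : Bool) : Prop := out = check_alt s
instance (s : String) (out : Bool) : Decidable (Spec_check s out) := by unfold Spec_check; infer_instance

-- ===== CLAIM (what is proved, stated in full; the proofs are below) =====
def Claim_equal_check : Prop := ∀ (s : String), Dom_check s → Spec_check s (check s)

-- ===== LEMMAS AND PROOFS =====

-- characters at even indices of xs (xs[::2])
def evens : List Char → List Char
  | [] => []
  | [c] => [c]
  | c :: _ :: t => c :: evens t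

-- characters at odd indices of xs (xs[1::2])
def odds (xs : List Char) : List Char := evens xs.tail

lemma evens_cons (c : Char) (t : List Char) : evens (c :: t) = c :: odds t := by
  cases t <;> simp [evens, odds]

lemma filterMap_even (xs : List Char) :
    (List.range ((xs.length + 1) / 2)).filterMap (fun k => xs[2 * k]?) = evens xs := by
  match xs with
  | [] => simp [evens]
  | [a] => simp [evens]
  | a :: b :: t =>
    have ih := filterMap_even t
    have hlen : ((a :: b :: t).length + 1) / 2 = (t.length + 1) / 2 + 1 := by
      simp; omega
    rw [hlen, List.range_succ_eq_map, List.filterMap_cons, List.filterMap_map]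
    have hfun : ((fun k => (a :: b :: t)[2 * k]?) ∘ Nat.succ) = fun k : Nat => t[2 * k]? := by
      funext k
      show (a :: b :: t)[2 * (k + 1)]? = t[2 * k]?
      have : 2 * (k + 1) = (2 * k + 1) + 1 := by omega
      rw [this, List.getElem?_cons_succ, List.getElem?_cons_succ]
    simp only [hfun, ih]
    simp [evens]
termination_by xs.length

lemma slice?_even (xs : List Char) :
    PySem.List.slice? xs none none 2 = some (evens xs) := by
  simp only [PySem.List.slice?, PySem.List.sliceIndices, show ¬((2:ℤ) = 0) by norm_num,
    show ¬((2:ℤ) < 0) by norm_num, show (0:ℤ) < 2 by norm_num, if_false]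
  have hcnt : (if (0:ℤ) < (xs.length:ℤ) then (((xs.length:ℤ) - 0 + 2 - 1) / 2).toNat else 0)
      = (xs.length + 1) / 2 := by split <;> omega
  have hfun : (fun x : ℕ => xs[((0:ℤ) + 2 * (x:ℤ)).toNat]?) = fun x : ℕ => xs[2 * x]? := by
    funext x; congr 1; omega
  rw [hcnt, hfun]
  simp only [if_true]
  rw [filterMap_even]

lemma slice?_odd (xs : List Char) :
    PySem.List.slice? xs (some 1) none 2 = some (odds xs) := by
  cases xs with
  | nil => decide
  | cons a t =>
    simp only [PySem.List.slice?, PySem.List.sliceIndices, show ¬((2:ℤ) = 0) by norm_num,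
      show ¬((2:ℤ) < 0) by norm_num, show (0:ℤ) < 2 by norm_num, show ¬((1:ℤ) < 0) by norm_num,
      if_false]
    have hmin : min (1:ℤ) (((a :: t).length : ℤ)) = 1 := by
      simp only [List.length_cons]; omega
    rw [hmin]
    have hcnt : (if (1:ℤ) < (((a :: t).length : ℤ)) then
        ((((a :: t).length : ℤ) - 1 + 2 - 1) / 2).toNat else 0) = (t.length + 1) / 2 := by
      simp only [List.length_cons]; split <;> omega
    have hfun : (fun x : ℕ => (a :: t)[((1:ℤ) + 2 * (x:ℤ)).toNat]?) = fun x : ℕ => t[2 * x]? := by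
      funext x
      have hx : ((1:ℤ) + 2 * (x:ℤ)).toNat = 2 * x + 1 := by omega
      rw [hx, List.getElem?_cons_succ]
    rw [hcnt, hfun]
    simp only [if_true]
    rw [filterMap_even]
    simp [odds]

-- A's loop rephrased structurally: the parity flag says whether the current index is even
def alt : Bool → List Char → Bool
  | _, [] => true
  | true, c :: t => if PySem.Chars.islower c then false else alt false t
  | false, c :: t => if PySem.Chars.isupper c then false else alt true t

lemma alt_spec (cs : List Char) :
    (alt true cs
      = ((evens cs).all (fun c => !(PySem.Chars.islower c))
          && (odds cs).all (fun c => !(PySem.Chars.isupper c))))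
    ∧ (alt false cs
      = ((evens cs).all (fun c => !(PySem.Chars.isupper c))
          && (odds cs).all (fun c => !(PySem.Chars.islower c)))) := by
  induction cs with
  | nil => simp [alt, evens, odds]
  | cons c t ih =>
    constructor <;>
    · rw [evens_cons]
      simp only [alt, odds, List.tail_cons, List.all_cons]
      cases h : PySem.Chars.islower c <;> cases h2 : PySem.Chars.isupper c <;>
        simp [ih.1, ih.2, odds, Bool.and_comm]

lemma checkGo_eq (cs : List Char) (i : Nat) :
    checkGo cs i = alt (i % 2 == 0) (cs.drop i) := by
  fun_induction checkGo cs i with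
  | case1 i h hpar hlow =>
    rw [List.drop_eq_getElem_cons h, hpar]
    simp only [alt]
    rw [if_pos hlow]
  | case2 i h hpar hlow ih =>
    have h1 : ((i + 1) % 2 == 0) = false := by
      have hp : i % 2 = 0 := by simpa using hpar
      simp only [beq_eq_false_iff_ne, ne_eq]
      omega
    rw [ih, h1, List.drop_eq_getElem_cons h, hpar]
    simp only [alt]
    rw [if_neg hlow]
  | case3 i h hpar hup =>
    have hp : (i % 2 == 0) = false := by simpa using hpar
    rw [List.drop_eq_getElem_cons h, hp]
    simp only [alt]
    rw [if_pos hup]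
  | case4 i h hpar hup ih =>
    have hp : i % 2 ≠ 0 := by simpa using hpar
    have h1 : ((i + 1) % 2 == 0) = true := by
      simp only [beq_iff_eq]
      omega
    have hp' : (i % 2 == 0) = false := by simpa using hpar
    rw [ih, h1, List.drop_eq_getElem_cons h, hp']
    simp only [alt]
    rw [if_neg hup]
  | case5 i h =>
    rw [List.drop_of_length_le (by omega)]
    cases (i % 2 == 0) <;> simp [alt]

-- ===== VERDICT (by name: the statement is the Claim_ definition above) =====
theorem check_spec : Claim_equal_check := by
  intro s _
  show check s = check_alt s
  rw [check, check_alt, slice?_even, slice?_odd, checkGo_eq]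
  simpa using (alt_spec s.toList).1
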